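-- pv_equiv track=rewrite | github.com/Homap/ZtoA_Heterozygosity | count_trans_transv.py | trans_tranv_count
-- ===== SOURCE A (Python) =====
-- def trans_tranv_count(sequence):
-- 	"""Return heterozygosity from
-- 		any sequence as a string """
-- 	# The first thing is to test the input
-- 	if not isinstance(sequence, str):
-- 		raise Exception("Sequence is not a string")
-- 	R = len([base.upper() for base in sequence if base.upper()=="R"])
-- 	Y = len([base.upper() for base in sequence if base.upper()=="Y"])
-- 	S = len([base.upper() for base in sequence if base.upper()=="S"])
-- 	W = len([base.upper() for base in sequence if base.upper()=="W"])
-- 	K = len([base.upper() for base in sequence if base.upper()=="K"])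
-- 	M = len([base.upper() for base in sequence if base.upper()=="M"])
--
-- 	return (R, Y, S, W, K, M)
-- ===== SOURCE B (Python) =====
-- def trans_tranv_count(sequence):
--     """Return heterozygosity from
--         any sequence as a string """
--     if not isinstance(sequence, str):
--         raise Exception("Sequence is not a string")
--     r = y = s = w = k = m = 0
--     for base in sequence:
--         u = base.upper()
--         if u == "R":
--             r += 1
--         elif u == "Y":
--             y += 1
--         elif u == "S":
--             s += 1
--         elif u == "W":
--             w += 1
--         elif u == "K":
--             k += 1
--         elif u == "M":
--             m += 1
--     return (r, y, s, w, k, m)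
-- ===== Notes on version B (the rewrite author's own statement) =====
-- stated objective: faster
-- what changed: Six separate filter-and-count passes over the sequence are replaced by one loop that classifies each character once into six running counters.
import Mathlib
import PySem

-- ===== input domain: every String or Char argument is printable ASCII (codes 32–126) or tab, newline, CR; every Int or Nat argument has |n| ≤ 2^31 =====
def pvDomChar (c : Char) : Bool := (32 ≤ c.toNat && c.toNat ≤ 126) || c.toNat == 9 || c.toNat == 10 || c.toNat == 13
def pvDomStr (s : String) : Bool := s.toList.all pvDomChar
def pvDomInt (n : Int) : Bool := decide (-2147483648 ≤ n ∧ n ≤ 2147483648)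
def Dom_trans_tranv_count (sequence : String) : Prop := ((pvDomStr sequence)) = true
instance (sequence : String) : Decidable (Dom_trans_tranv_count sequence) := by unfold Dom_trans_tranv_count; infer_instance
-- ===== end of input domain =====

-- B replaces A's six filter-and-count passes by one loop classifying each character once (constant-factor speedup).

-- ===== PORT A =====
-- each line: len([base.upper() for base in sequence if base.upper()==L])
def pvCountA (sequence : String) (L : Char) : Int :=
  ((sequence.toList.filter (fun base => PySem.Chars.upperChar base == L)).map
    (fun base => PySem.Chars.upperChar base)).length

def trans_tranv_count (sequence : String) : Int × Int × Int × Int × Int × Int :=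
  let R := pvCountA sequence 'R'
  let Y := pvCountA sequence 'Y'
  let S := pvCountA sequence 'S'
  let W := pvCountA sequence 'W'
  let K := pvCountA sequence 'K'
  let M := pvCountA sequence 'M'
  (R, Y, S, W, K, M)

-- ===== PORT B =====
-- one pass: for base in sequence, bump the counter matching base.upper()
def pvStepB (acc : Int × Int × Int × Int × Int × Int) (base : Char) :
    Int × Int × Int × Int × Int × Int :=
  let (r, y, s, w, k, m) := acc
  let u := PySem.Chars.upperChar base
  if u == 'R' then (r + 1, y, s, w, k, m)
  else if u == 'Y' then (r, y + 1, s, w, k, m)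
  else if u == 'S' then (r, y, s + 1, w, k, m)
  else if u == 'W' then (r, y, s, w + 1, k, m)
  else if u == 'K' then (r, y, s, w, k + 1, m)
  else if u == 'M' then (r, y, s, w, k, m + 1)
  else (r, y, s, w, k, m)

def trans_tranv_count_alt (sequence : String) : Int × Int × Int × Int × Int × Int :=
  sequence.toList.foldl pvStepB (0, 0, 0, 0, 0, 0)

-- ===== PRECONDITION & SPEC =====
def Spec_trans_tranv_count (sequence : String) (out : Int × Int × Int × Int × Int × Int) : Prop := out = trans_tranv_count_alt sequence
instance (sequence : String) (out : Int × Int × Int × Int × Int × Int) : Decidable (Spec_trans_tranv_count sequence out) := by unfold Spec_trans_tranv_count; infer_instance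

-- ===== CLAIM (what is proved, stated in full; the proofs are below) =====
def Claim_equal_trans_tranv_count : Prop := ∀ (sequence : String), Dom_trans_tranv_count sequence → Spec_trans_tranv_count sequence (trans_tranv_count sequence)

-- ===== LEMMAS AND PROOFS =====
def pvCountL (l : List Char) (L : Char) : Int :=
  ((l.filter (fun base => PySem.Chars.upperChar base == L)).map
    (fun base => PySem.Chars.upperChar base)).length

theorem pvCountL_cons (c : Char) (l : List Char) (L : Char) :
    pvCountL (c :: l) L =
      (if PySem.Chars.upperChar c == L then 1 else 0) + pvCountL l L := by
  simp only [pvCountL, List.filter_cons]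
  by_cases h : PySem.Chars.upperChar c == L <;> simp [h]
  omega

theorem pvFoldB (l : List Char) (r y s w k m : Int) :
    l.foldl pvStepB (r, y, s, w, k, m) =
      (r + pvCountL l 'R', y + pvCountL l 'Y', s + pvCountL l 'S',
       w + pvCountL l 'W', k + pvCountL l 'K', m + pvCountL l 'M') := by
  induction l generalizing r y s w k m with
  | nil => simp [pvCountL]
  | cons c t ih =>
    simp only [List.foldl_cons, pvStepB, pvCountL_cons]
    split_ifs <;> rw [ih] <;> simp_all <;> omega

-- ===== VERDICT (by name: the statement is the Claim_ definition above) =====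
theorem trans_tranv_count_spec : Claim_equal_trans_tranv_count := by
  intro sequence _
  unfold Spec_trans_tranv_count trans_tranv_count trans_tranv_count_alt pvCountA
  rw [pvFoldB]
  simp [pvCountL]
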